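-- pv_equiv track=rewrite | github.com/ozzlemdemir/ClientServer | playFair.py | sifrelenecek_metin
-- ===== SOURCE A (Python) =====
-- def sifrelenecek_metin(text):
--
--     text = "".join([c.upper() for c in text if c.isalpha()])
--     text = text.replace("J", "I")
--     result = ""
--     i = 0
--
--     while i < len(text):
--         a = text[i]
--         b = text[i + 1] if i + 1 < len(text) else "X"
--
--         if a == b:
--             result += a + "X"
--             i += 1
--         else:
--             result += a + b
--             i += 2
--     if len(result) % 2 != 0:
--         result += "X"
--
--     return result
-- ===== SOURCE B (Python) =====
-- def sifrelenecek_metin(text):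
--     out = []
--     pending = None
--     for c in text:
--         if not c.isalpha():
--             continue
--         u = c.upper()
--         if u == "J":
--             u = "I"
--         if pending is None:
--             pending = u
--         elif pending == u:
--             out.append(pending)
--             out.append("X")
--             pending = u
--         else:
--             out.append(pending)
--             out.append(u)
--             pending = None
--     if pending is not None:
--         out.append(pending)
--         out.append("X")
--     return "".join(out)
-- ===== Notes on version B (the rewrite author's own statement) =====
-- stated objective: alternative
-- what changed: Replaces A's two-phase approach (build a normalized string, then an index-based variable-step while loop with lookahead, quadratic += concatenation, and a trailing parity pad) with a single streaming pass over the raw text keeping one pending-letter buffer and an output list, fusing normalization with digraph formation.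
import Mathlib
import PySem

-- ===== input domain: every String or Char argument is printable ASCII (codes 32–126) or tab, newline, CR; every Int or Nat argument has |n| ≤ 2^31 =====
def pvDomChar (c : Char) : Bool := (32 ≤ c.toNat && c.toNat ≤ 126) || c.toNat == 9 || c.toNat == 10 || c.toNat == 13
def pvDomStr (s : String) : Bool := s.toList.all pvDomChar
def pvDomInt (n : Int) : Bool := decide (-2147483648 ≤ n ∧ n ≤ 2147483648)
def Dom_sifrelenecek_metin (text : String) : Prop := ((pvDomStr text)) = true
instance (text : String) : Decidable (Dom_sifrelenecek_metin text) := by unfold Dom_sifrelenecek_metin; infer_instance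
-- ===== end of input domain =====

-- B fuses A's normalize-then-index-loop into one streaming pass with a pending-letter buffer (objective: alternative decomposition).

-- ===== PORT A =====
-- the while loop over the normalized text: i advances by 1 on a double (emitting aX), by 2 otherwise (emitting ab, b='X' past the end)
def pvLoopA : List Char → List Char
  | [] => []
  | [a] =>
    -- b = 'X' (lookahead past the end)
    if a == 'X' then a :: 'X' :: pvLoopA [] else a :: 'X' :: pvLoopA []
  | a :: b :: rest =>
    if a == b then a :: 'X' :: pvLoopA (b :: rest) else a :: b :: pvLoopA rest

-- text = "".join([c.upper() for c in text if c.isalpha()]); text = text.replace("J", "I")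
def pvNormA (text : String) : List Char :=
  PySem.Chars.replace ((text.toList.filter PySem.Chars.isalpha).map PySem.Chars.upperChar) ['J'] ['I']

def sifrelenecek_metin (text : String) : String :=
  let res := pvLoopA (pvNormA text)
  if res.length % 2 ≠ 0 then String.ofList (res ++ ['X']) else String.ofList res

-- ===== PORT B =====
-- one fold step of the streaming automaton: state = (emitted output, pending letter)
def pvStepB (st : List Char × Option Char) (c : Char) : List Char × Option Char :=
  if PySem.Chars.isalpha c then
    let u := PySem.Chars.upperChar c
    let u := if u == 'J' then 'I' else u
    match st.2 with
    | none => (st.1, some u)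
    | some p => if p == u then (st.1 ++ [p, 'X'], some u) else (st.1 ++ [p, u], none)
  else st

def sifrelenecek_metin_alt (text : String) : String :=
  let st := text.toList.foldl pvStepB ([], none)
  match st.2 with
  | none => String.ofList st.1
  | some p => String.ofList (st.1 ++ [p, 'X'])

-- ===== PRECONDITION & SPEC =====
def Spec_sifrelenecek_metin (text : String) (out : String) : Prop := out = sifrelenecek_metin_alt text
instance (text : String) (out : String) : Decidable (Spec_sifrelenecek_metin text out) := by unfold Spec_sifrelenecek_metin; infer_instance

-- ===== CLAIM (what is proved, stated in full; the proofs are below) =====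
def Claim_equal_sifrelenecek_metin : Prop := ∀ (text : String), Dom_sifrelenecek_metin text → Spec_sifrelenecek_metin text (sifrelenecek_metin text)

-- ===== LEMMAS AND PROOFS =====

-- the per-character normalization B performs: uppercase, then J→I
def pvF (c : Char) : Char :=
  let u := PySem.Chars.upperChar c
  if u == 'J' then 'I' else u

def pvJmap (c : Char) : Char := if c == 'J' then 'I' else c

lemma pv_replace_go (fuel : Nat) : ∀ (l acc : List Char), l.length ≤ fuel →
    PySem.Chars.replace.go ['J'] ['I'] fuel l acc = acc.reverse ++ l.map pvJmap := by
  induction fuel with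
  | zero =>
    intro l acc h
    have : l = [] := List.eq_nil_of_length_eq_zero (Nat.le_zero.mp h)
    subst this; simp [PySem.Chars.replace.go]
  | succ n ih =>
    intro l acc h
    cases l with
    | nil => simp [PySem.Chars.replace.go]
    | cons c t =>
      rw [PySem.Chars.replace.go]
      by_cases hc : c = 'J'
      · subst hc
        have hp : List.isPrefixOf ['J'] ('J' :: t) = true := by simp [List.isPrefixOf]
        rw [if_pos hp]
        have hd : List.drop (['J'] : List Char).length ('J' :: t) = t := rfl
        rw [hd, ih t _ (by simpa using h)]
        simp [pvJmap]
      · have hp : List.isPrefixOf ['J'] (c :: t) = false := by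
          simp [List.isPrefixOf]; exact fun h' => hc h'.symm
        rw [if_neg (by simp [hp])]
        rw [ih t _ (by simpa using h)]
        simp [pvJmap, hc]

lemma pv_replace (l : List Char) :
    PySem.Chars.replace l ['J'] ['I'] = l.map pvJmap := by
  rw [PySem.Chars.replace]
  rw [if_neg (by simp)]
  exact pv_replace_go l.length l [] le_rfl

lemma pv_norm_eq (text : String) :
    pvNormA text = (text.toList.filter PySem.Chars.isalpha).map pvF := by
  unfold pvNormA
  rw [pv_replace, List.map_map]
  rfl

-- pvLoopA always emits pairs: its length is even (A's trailing pad is dead code)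
lemma pv_loopA_even (ns : List Char) : (pvLoopA ns).length % 2 = 0 := by
  induction ns using pvLoopA.induct <;> simp_all [pvLoopA, Nat.add_mod]

-- finishing the automaton: flush the pending letter with an 'X'
def pvFinal (st : List Char × Option Char) : List Char :=
  match st.2 with
  | none => st.1
  | some p => st.1 ++ [p, 'X']

-- main invariant: folding B's step from state (out, pend) produces out ++ pvLoopA of the
-- (pending-prefixed) normalized remainder
lemma pv_fold_inv (l : List Char) : ∀ (out : List Char) (pend : Option Char),
    pvFinal (l.foldl pvStepB (out, pend)) =
      out ++ (match pend with
              | none => pvLoopA ((l.filter PySem.Chars.isalpha).map pvF)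
              | some p => pvLoopA (p :: (l.filter PySem.Chars.isalpha).map pvF)) := by
  induction l with
  | nil =>
    intro out pend
    cases pend with
    | none => simp [pvFinal, pvLoopA]
    | some p => simp [pvFinal, pvLoopA]
  | cons c t ih =>
    intro out pend
    by_cases hc : PySem.Chars.isalpha c = true
    · cases pend with
      | none =>
        simp only [List.foldl_cons, pvStepB, hc, if_pos, List.filter_cons, List.map_cons]
        rw [ih]
        simp [pvF]
      | some p =>
        by_cases hpu : p = pvF c
        · have hbeq : (p == pvF c) = true := by simp [hpu]
          simp only [List.foldl_cons, pvStepB, hc, if_pos, List.filter_cons, List.map_cons]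
          show pvFinal (List.foldl pvStepB (if (p == pvF c) = true then _ else _) t) = _
          rw [if_pos hbeq, ih]
          subst hpu
          simp [pvLoopA, pvF]
        · have hbeq : (p == pvF c) = false := by simp [hpu]
          simp only [List.foldl_cons, pvStepB, hc, if_pos, List.filter_cons, List.map_cons]
          show pvFinal (List.foldl pvStepB (if (p == pvF c) = true then _ else _) t) = _
          rw [hbeq]
          simp only [Bool.false_eq_true, if_neg (by simp : ¬False)]
          rw [ih]
          simp [pvF] at hpu
          simp [pvLoopA, pvF, hpu]
    · have hc' : PySem.Chars.isalpha c = false := by simpa using hc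
      simp only [List.foldl_cons, pvStepB, hc', List.filter_cons]
      rw [if_neg (by simp)]
      simp only [Bool.false_eq_true, if_neg (by simp : ¬False)]
      exact ih out pend

-- ===== VERDICT (by name: the statement is the Claim_ definition above) =====
theorem sifrelenecek_metin_spec : Claim_equal_sifrelenecek_metin := by
  intro text _
  unfold Spec_sifrelenecek_metin sifrelenecek_metin sifrelenecek_metin_alt
  have hB := pv_fold_inv text.toList [] none
  simp only [List.nil_append] at hB
  have heven := pv_loopA_even (pvNormA text)
  rw [if_neg (by omega)]
  rw [pv_norm_eq] at *
  cases hst : (text.toList.foldl pvStepB ([], none)) with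
  | mk o pn =>
    rw [hst] at hB
    cases pn with
    | none =>
      simp only [pvFinal] at hB
      show String.ofList _ = String.ofList o
      rw [hB]
    | some p =>
      simp only [pvFinal] at hB
      show String.ofList _ = String.ofList (o ++ [p, 'X'])
      rw [hB]
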